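-- pv_equiv track=rewrite | github.com/Aman-Kumar342/placementprepration | placementprepration/stackpermutation.py | is_stack_permutation
-- ===== SOURCE A (Python) =====
-- def is_stack_permutation(inp, out):
--     if len(inp) != len(out):
--         return False
--     stack = []
--     j = 0
--     for val in inp:
--         stack.append(val)
--         while stack and j < len(out) and stack[-1] == out[j]:
--             stack.pop()
--             j += 1
--     return not stack
-- ===== SOURCE B (Python) =====
-- def is_stack_permutation(inp, out):
--     if len(inp) != len(out):
--         return False
--     stack = []
--     i = 0
--     n = len(inp)
--     for target in out:
--         while (not stack or stack[-1] != target) and i < n: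
--             stack.append(inp[i])
--             i += 1
--         if stack and stack[-1] == target:
--             stack.pop()
--         else:
--             return False
--     return True
-- ===== Notes on version B (the rewrite author's own statement) =====
-- stated objective: alternative
-- what changed: The simulation is driven by the output sequence instead of the input: for each target in out, elements of inp are pushed lazily until the stack top matches (then popped) or inp is exhausted (then early False), rather than eagerly pushing every inp element and pop-whiling against an out index.
import Mathlib
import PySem

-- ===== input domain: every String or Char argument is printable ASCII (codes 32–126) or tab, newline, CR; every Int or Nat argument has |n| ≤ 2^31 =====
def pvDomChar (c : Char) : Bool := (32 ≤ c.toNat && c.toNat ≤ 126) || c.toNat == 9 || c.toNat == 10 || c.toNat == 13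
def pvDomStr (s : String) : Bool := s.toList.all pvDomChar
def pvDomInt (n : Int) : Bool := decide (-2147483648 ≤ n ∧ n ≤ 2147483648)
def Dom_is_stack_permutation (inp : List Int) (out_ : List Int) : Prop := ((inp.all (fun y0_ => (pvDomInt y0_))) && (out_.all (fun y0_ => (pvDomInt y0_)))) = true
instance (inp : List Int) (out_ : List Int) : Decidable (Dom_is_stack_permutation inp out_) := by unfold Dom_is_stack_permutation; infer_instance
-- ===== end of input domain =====

-- B drives the simulation by the output sequence (push-until-match per target) instead of A's
-- input-driven eager push with a pop-while; same O(n) cost, a different decomposition.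

-- ===== PORT A =====
-- stack is held top-first (Python append/pop at the right end = cons/tail here).
-- inner `while stack and j < len(out) and stack[-1] == out[j]`: `out_[j]? = some s` is exactly
-- `j < len(out) ∧ out[j] == s`.
def popWhileA (out_ : List Int) : List Int → Nat → List Int × Nat
  | [], j => ([], j)
  | s :: st, j => if out_[j]? = some s then popWhileA out_ st (j + 1) else (s :: st, j)

def is_stack_permutation (inp : List Int) (out_ : List Int) : Bool :=
  if inp.length ≠ out_.length then false
  else
    ((inp.foldl (fun p val => popWhileA out_ (val :: p.1) p.2) ([], 0)).1).isEmpty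

-- ===== PORT B =====
-- `while (not stack or stack[-1] != target) and i < n: stack.append(inp[i]); i += 1`,
-- with the not-yet-pushed suffix of inp carried as a list.
def pushUntilB (target : Int) : List Int → List Int → List Int × List Int
  | stack, [] => (stack, [])
  | stack, i :: rest =>
    match stack with
    | s :: _ => if s ≠ target then pushUntilB target (i :: stack) rest else (stack, i :: rest)
    | [] => pushUntilB target (i :: stack) rest

-- the `for target in out` loop with its early `return False`
def runB : List Int → List Int → List Int → Bool
  | [], _stack, _rest => true
  | t :: ts, stack, rest =>
    match pushUntilB t stack rest with
    | (s :: st, r) => if s = t then runB ts st r else false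
    | ([], _) => false

def is_stack_permutation_alt (inp : List Int) (out_ : List Int) : Bool :=
  if inp.length ≠ out_.length then false
  else runB out_ [] inp

-- ===== PRECONDITION & SPEC =====
def Spec_is_stack_permutation (inp : List Int) (out_ : List Int) (out : Bool) : Prop := out = is_stack_permutation_alt inp out_
instance (inp : List Int) (out_ : List Int) (out : Bool) : Decidable (Spec_is_stack_permutation inp out_ out) := by unfold Spec_is_stack_permutation; infer_instance

-- ===== CLAIM (what is proved, stated in full; the proofs are below) =====
def Claim_equal_is_stack_permutation : Prop := ∀ (inp : List Int) (out_ : List Int), Dom_is_stack_permutation inp out_ → Spec_is_stack_permutation inp out_ (is_stack_permutation inp out_)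

-- ===== LEMMAS AND PROOFS =====

-- common reference simulation: greedy one-step machine on (remaining input, stack, remaining output)
def greedy : List Int → List Int → List Int → Bool
  | inp, stack, [] => stack.isEmpty && inp.isEmpty
  | inp, stack, t :: ts =>
    match stack with
    | s :: st =>
      if s = t then greedy inp st ts
      else
        match inp with
        | [] => false
        | i :: ir => greedy ir (i :: s :: st) (t :: ts)
    | [] =>
      match inp with
      | [] => false
      | i :: ir => greedy ir (i :: []) (t :: ts)
  termination_by inp _ rem => inp.length + rem.length
  decreasing_by all_goals (simp only [List.length_cons]; omega)

lemma popWhileA_le (out_ : List Int) : ∀ (s : List Int) (j : Nat), j ≤ (popWhileA out_ s j).2 := by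
  intro s
  induction s with
  | nil => intro j; simp [popWhileA]
  | cons a s ih =>
    intro j
    simp only [popWhileA]
    split
    · exact le_trans (Nat.le_succ j) (ih (j + 1))
    · simp

lemma popWhileA_len (out_ : List Int) : ∀ (s : List Int) (j : Nat),
    (popWhileA out_ s j).1.length + (popWhileA out_ s j).2 = s.length + j := by
  intro s
  induction s with
  | nil => intro j; simp [popWhileA]
  | cons a s ih =>
    intro j
    simp only [popWhileA]
    split
    · rw [ih (j + 1)]; simp; omega
    · simp

lemma popWhileA_stuck (out_ : List Int) : ∀ (s : List Int) (j : Nat),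
    popWhileA out_ (popWhileA out_ s j).1 (popWhileA out_ s j).2 = popWhileA out_ s j := by
  intro s
  induction s with
  | nil => intro j; simp [popWhileA]
  | cons a s ih =>
    intro j
    simp only [popWhileA]
    split
    · exact ih (j + 1)
    · rename_i h
      simp only [popWhileA]
      rw [if_neg h]

-- a stuck state does not have its out-element on top
lemma stuck_not_top (out_ : List Int) (s : Int) (st : List Int) (j : Nat)
    (hstuck : popWhileA out_ (s :: st) j = (s :: st, j)) : ¬ (out_[j]? = some s) := by
  intro h
  have hle := popWhileA_le out_ st (j + 1)
  simp only [popWhileA] at hstuck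
  rw [if_pos h] at hstuck
  have h2 := congrArg Prod.snd hstuck
  simp at h2
  omega

-- greedy absorbs a pop-while burst
lemma greedy_popWhileA (out_ inp : List Int) : ∀ (stack : List Int) (j : Nat),
    greedy inp stack (out_.drop j)
      = greedy inp (popWhileA out_ stack j).1 (out_.drop (popWhileA out_ stack j).2) := by
  intro stack
  induction stack with
  | nil => intro j; simp [popWhileA]
  | cons s st ih =>
    intro j
    simp only [popWhileA]
    split
    · rename_i h
      obtain ⟨hj, hs⟩ := List.getElem?_eq_some_iff.mp h
      have hdrop : out_.drop j = s :: out_.drop (j + 1) := by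
        rw [List.drop_eq_getElem_cons hj, hs]
      rw [hdrop]
      rw [show greedy inp (s :: st) (s :: out_.drop (j + 1)) = greedy inp st (out_.drop (j + 1)) by
        rw [greedy.eq_def]; simp]
      exact ih (j + 1)
    · rfl

-- A's fold, started from a stuck state, computes greedy
lemma A_eq_greedy (out_ : List Int) : ∀ (inp stack : List Int) (j : Nat),
    popWhileA out_ stack j = (stack, j) →
    inp.length + stack.length + j = out_.length →
    ((inp.foldl (fun p val => popWhileA out_ (val :: p.1) p.2) (stack, j)).1).isEmpty
      = greedy inp stack (out_.drop j) := by
  intro inp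
  induction inp with
  | nil =>
    intro stack j hstuck hlen
    simp only [List.foldl_nil]
    simp only [List.length_nil] at hlen
    rcases hd : out_.drop j with _ | ⟨t, ts⟩
    · have hle : out_.length ≤ j := List.drop_eq_nil_iff.mp hd
      have hst : stack = [] := List.length_eq_zero_iff.mp (by omega)
      subst hst
      simp [greedy]
    · have hj : j < out_.length := by
        by_contra hc
        rw [List.drop_eq_nil_iff.mpr (by omega)] at hd
        simp at hd
      rcases stack with _ | ⟨s, st⟩
      · simp only [List.length_nil] at hlen; omega
      · have hne := stuck_not_top out_ s st j hstuck
        have ht : out_[j] = t := by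
          have h2 := List.drop_eq_getElem_cons hj
          rw [hd] at h2
          injection h2 with h3 _
          exact h3.symm
        have hst : s ≠ t := by
          intro h; exact hne (List.getElem?_eq_some_iff.mpr ⟨hj, by rw [ht, h]⟩)
        simp [greedy, hst]
  | cons i ir ih =>
    intro stack j hstuck hlen
    simp only [List.foldl_cons]
    simp only [List.length_cons] at hlen
    have hj : j < out_.length := by omega
    rcases hd : out_.drop j with _ | ⟨t, ts⟩
    · exact absurd (List.drop_eq_nil_iff.mp hd) (by omega)
    have ht : out_[j] = t := by
      have h2 := List.drop_eq_getElem_cons hj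
      rw [hd] at h2
      injection h2 with h3 _
      exact h3.symm
    have hlen2 := popWhileA_len out_ (i :: stack) j
    have hrec := ih (popWhileA out_ (i :: stack) j).1 (popWhileA out_ (i :: stack) j).2
      (popWhileA_stuck out_ (i :: stack) j)
      (by simp only [List.length_cons] at hlen2; omega)
    have hpush : greedy (i :: ir) stack (t :: ts) = greedy ir (i :: stack) (t :: ts) := by
      rcases stack with _ | ⟨s, st⟩
      · simp [greedy]
      · have hne := stuck_not_top out_ s st j hstuck
        have hsne : s ≠ t := by
          intro h; exact hne (List.getElem?_eq_some_iff.mpr ⟨hj, by rw [ht, h]⟩)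
        simp [greedy, hsne]
    rw [hpush, ← hd, greedy_popWhileA out_ ir (i :: stack) j]
    exact hrec

lemma pushUntilB_top_eq (t : Int) (st rest : List Int) :
    pushUntilB t (t :: st) rest = (t :: st, rest) := by
  cases rest <;> simp [pushUntilB]

-- B's loop, under the length invariant, computes greedy
lemma runB_eq_greedy : ∀ (inp stack rem : List Int),
    inp.length + stack.length = rem.length →
    runB rem stack inp = greedy inp stack rem := by
  intro inp stack rem
  induction inp, stack, rem using greedy.induct with
  | case1 inp stack =>
    intro hlen
    simp only [List.length_nil] at hlen
    have h1 : inp = [] := List.length_eq_zero_iff.mp (by omega)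
    have h2 : stack = [] := List.length_eq_zero_iff.mp (by omega)
    subst h1; subst h2
    simp [runB, greedy]
  | case2 inp ts s st ih =>
    intro hlen
    rw [show runB (s :: ts) (s :: st) inp = runB ts st inp by
      simp [runB, pushUntilB_top_eq]]
    simp only [List.length_cons] at hlen
    rw [ih (by omega)]
    conv_rhs => rw [greedy.eq_def]
    simp
  | case3 t ts s st hne =>
    intro _
    simp [runB, pushUntilB, hne, greedy]
  | case4 t ts s st hne i ir ih =>
    intro hlen
    rw [show runB (t :: ts) (s :: st) (i :: ir) = runB (t :: ts) (i :: s :: st) ir by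
      simp only [runB, pushUntilB]
      rw [if_pos hne]]
    simp only [List.length_cons] at hlen
    rw [ih (by simp only [List.length_cons]; omega)]
    simp [greedy, hne]
  | case5 t ts =>
    intro hlen
    simp at hlen
  | case6 t ts i ir ih =>
    intro hlen
    rw [show runB (t :: ts) [] (i :: ir) = runB (t :: ts) [i] ir by
      simp only [runB, pushUntilB]]
    simp only [List.length_cons, List.length_nil] at hlen
    rw [ih (by simp only [List.length_cons, List.length_nil]; omega)]
    simp [greedy]

-- ===== VERDICT (by name: the statement is the Claim_ definition above) =====
theorem is_stack_permutation_spec : Claim_equal_is_stack_permutation := by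
  unfold Claim_equal_is_stack_permutation
  intro inp out_ _
  unfold Spec_is_stack_permutation is_stack_permutation is_stack_permutation_alt
  by_cases h : inp.length = out_.length
  · simp only [h, ne_eq, not_true_eq_false, if_false]
    rw [A_eq_greedy out_ inp [] 0 (by simp [popWhileA]) (by simp [h]),
      List.drop_zero, runB_eq_greedy inp [] out_ (by simpa using h)]
  · simp [h]
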